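-- pv_equiv track=rewrite | github.com/gardev22/Chatbot_quadra_eng | bot/openai_backend.py | agrupar_blocos
-- ===== SOURCE A (Python) =====
-- GROUP_WINDOW = 2
--
-- def agrupar_blocos(blocos, janela=GROUP_WINDOW):
--     grouped = []
--     n = len(blocos)
--     if n == 0:
--         return grouped
--
--     for i in range(n):
--         base = blocos[i]
--         current_file_id = base.get("file_id")
--         group = [base]
--
--         for offset in range(1, janela):
--             j = i + offset
--             if j >= n:
--                 break
--             b_next = blocos[j]
--             if b_next.get("file_id") != current_file_id:
--                 break
--             group.append(b_next)
--
--         grouped.append({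
--             "pagina": group[0].get("pagina", "?"),
--             "texto": " ".join(b["texto"] for b in group),
--             "file_id": current_file_id,
--         })
--
--     return grouped
-- ===== SOURCE B (Python) =====
-- from itertools import groupby
--
-- GROUP_WINDOW = 2
--
-- def agrupar_blocos(blocos, janela=GROUP_WINDOW):
--     out = []
--     extra = max(janela - 1, 0)
--     for _, g in groupby(blocos, key=lambda b: b.get("file_id")):
--         run = list(g)
--         for p, base in enumerate(run):
--             window = [base] + run[p + 1 : p + 1 + extra]
--             out.append({
--                 "pagina": base.get("pagina", "?"),
--                 "texto": " ".join(b["texto"] for b in window),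
--                 "file_id": base.get("file_id"),
--             })
--     return out
-- ===== Notes on version B (the rewrite author's own statement) =====
-- stated objective: alternative
-- what changed: B first segments the list into maximal runs of consecutive blocks with equal file_id (itertools.groupby) and then windows each run independently, instead of A's per-index inner extend-and-break loop over the global list.
import Mathlib
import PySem

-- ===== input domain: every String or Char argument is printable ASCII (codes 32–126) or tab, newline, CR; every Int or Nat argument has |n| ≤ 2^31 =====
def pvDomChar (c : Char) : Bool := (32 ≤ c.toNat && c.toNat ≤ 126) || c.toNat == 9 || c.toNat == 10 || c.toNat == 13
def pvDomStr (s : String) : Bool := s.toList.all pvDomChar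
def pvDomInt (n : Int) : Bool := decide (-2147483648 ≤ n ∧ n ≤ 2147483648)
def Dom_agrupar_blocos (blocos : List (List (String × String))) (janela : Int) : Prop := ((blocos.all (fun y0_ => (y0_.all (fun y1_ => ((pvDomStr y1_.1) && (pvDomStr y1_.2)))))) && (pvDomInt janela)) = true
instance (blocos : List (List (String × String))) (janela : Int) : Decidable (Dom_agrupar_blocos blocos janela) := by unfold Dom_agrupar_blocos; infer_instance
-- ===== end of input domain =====

-- B replaces A's per-index inner extend-and-break loop by a run-segmentation pass
-- (maximal runs of equal file_id, itertools.groupby) followed by per-run windowing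
-- (objective: alternative decomposition, same cost).

-- ===== PORT A =====
-- b.get("file_id")
def pvFid (b : List (String × String)) : Option String :=
  PySem.Dict.get? (PySem.Dict.mk b) "file_id"

-- inner loop 'for offset in range(1, janela): …' with its three break conditions;
-- ported as recursion on offset (Python's range is iterated lazily and the loop
-- breaks as soon as j >= n, so recursion on the offset counter is the faithful shape)
def pvInnerA (blocos : List (List (String × String))) (n i janela : Int)
    (cur : Option String) (offset : Int)
    (group : List (List (String × String))) : List (List (String × String)) :=
  if offset < janela then
    let j := i + offset
    if j ≥ n then group
    else
      match PySem.List.pyGet? blocos j with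
      | none => group            -- unreachable: 0 ≤ j < n
      | some bnext =>
        if pvFid bnext ≠ cur then group
        else pvInnerA blocos n i janela cur (offset + 1) (group ++ [bnext])
  else group
termination_by (janela - offset).toNat
decreasing_by omega

-- the dict literal appended to 'grouped'
def pvMkOutA (group : List (List (String × String))) (cur : Option String) : List (String × String) :=
  [("pagina", PySem.Dict.getD (PySem.Dict.mk (group.headD [])) "pagina" "?"),
   ("texto", PySem.Str.join " " (group.map (fun b => (PySem.Dict.get? (PySem.Dict.mk b) "texto").getD ""))),
   ("file_id", cur.getD "")]    -- b["texto"] / file_id value: present under Pre_ (else Python raises / yields None)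

def agrupar_blocos (blocos : List (List (String × String))) (janela : Int) : List (List (String × String)) :=
  let grouped : List (List (String × String)) := []
  let n : Int := (blocos.length : Int)
  if n = 0 then grouped
  else
    (PySem.List.pyRange 0 n 1).foldl (fun grouped i =>
      grouped ++
        (match PySem.List.pyGet? blocos i with
         | none => []            -- unreachable: i ∈ range(n)
         | some base =>
           [pvMkOutA (pvInnerA blocos n i janela (pvFid base) 1 [base]) (pvFid base)]))
      grouped

-- ===== PORT B =====
def pvKeyEq (k : Option String) (b : List (String × String)) : Bool :=
  pvFid b == k

-- itertools.groupby(blocos, key=…): maximal runs of consecutive blocks with equal file_id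
def pvRuns (blocos : List (List (String × String))) : List (List (List (String × String))) :=
  match blocos with
  | [] => []
  | b :: rest =>
    (b :: rest.takeWhile (pvKeyEq (pvFid b))) ::
      pvRuns (rest.dropWhile (pvKeyEq (pvFid b)))
termination_by blocos.length
decreasing_by simpa using Nat.lt_succ_of_le (List.length_dropWhile_le _ _)

def pvMkOutB (base : List (String × String)) (window : List (List (String × String))) : List (String × String) :=
  [("pagina", PySem.Dict.getD (PySem.Dict.mk base) "pagina" "?"),
   ("texto", PySem.Str.join " " (window.map (fun b => (PySem.Dict.get? (PySem.Dict.mk b) "texto").getD ""))),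
   ("file_id", (pvFid base).getD "")]

-- 'for p, base in enumerate(run): window = [base] + run[p+1 : p+1+extra]'
-- (run[p+1 : p+1+extra] is, relative to the suffix after base, the slice [0:extra])
def pvRunOut (extra : Int) (run : List (List (String × String))) : List (List (String × String)) :=
  match run with
  | [] => []
  | base :: rest =>
    pvMkOutB base (base :: PySem.List.slice rest (some 0) (some extra)) :: pvRunOut extra rest

def agrupar_blocos_alt (blocos : List (List (String × String))) (janela : Int) : List (List (String × String)) :=
  (pvRuns blocos).flatMap (pvRunOut (max (janela - 1) 0))

-- ===== PRECONDITION & SPEC =====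
-- Pre_ excludes blocks without a "texto" key (Python A raises KeyError there) and blocks
-- without a "file_id" key (A returns a dict whose "file_id" value is None, not a String,
-- so the result leaves the declared type).
def Pre_agrupar_blocos (blocos : List (List (String × String))) (janela : Int) : Prop :=
  ∀ b ∈ blocos, (PySem.Dict.mk b).contains "texto" = true ∧ (PySem.Dict.mk b).contains "file_id" = true
instance (blocos : List (List (String × String))) (janela : Int) : Decidable (Pre_agrupar_blocos blocos janela) := by
  unfold Pre_agrupar_blocos; infer_instance

def pvWitness_agrupar_blocos : (List (List (String × String))) × Int :=
  ([[("texto", "ola"), ("file_id", "f"), ("pagina", "1")],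
    [("texto", "mundo"), ("file_id", "f")],
    [("texto", "fim"), ("file_id", "g"), ("pagina", "2")]], 2)

def Spec_agrupar_blocos (blocos : List (List (String × String))) (janela : Int) (out : List (List (String × String))) : Prop := out = agrupar_blocos_alt blocos janela
instance (blocos : List (List (String × String))) (janela : Int) (out : List (List (String × String))) : Decidable (Spec_agrupar_blocos blocos janela out) := by unfold Spec_agrupar_blocos; infer_instance

-- ===== CLAIM (what is proved, stated in full; the proofs are below) =====
def Claim_equal_agrupar_blocos : Prop := ∀ (blocos : List (List (String × String))) (janela : Int), Dom_agrupar_blocos blocos janela → Pre_agrupar_blocos blocos janela → Spec_agrupar_blocos blocos janela (agrupar_blocos blocos janela)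

-- ===== LEMMAS AND PROOFS =====

-- reference shape: A's per-index output, read off the suffix starting at that index
def pvSufA (janela : Int) : List (List (String × String)) → List (List (String × String))
  | [] => []
  | b :: rest =>
    pvMkOutA (b :: (rest.takeWhile (pvKeyEq (pvFid b))).take (janela - 1).toNat) (pvFid b)
      :: pvSufA janela rest

theorem innerA_eq (blocos : List (List (String × String))) (janela : Int) (cur : Option String)
    (i offset : Int) (group : List (List (String × String)))
    (hi : 0 ≤ i) (hoff : 0 ≤ offset) :
    pvInnerA blocos (blocos.length : Int) i janela cur offset group =
      group ++ ((blocos.drop (i + offset).toNat).takeWhile (pvKeyEq cur)).take (janela - offset).toNat := by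
  rw [pvInnerA]
  by_cases h1 : offset < janela
  · rw [if_pos h1]
    by_cases h2 : i + offset ≥ (blocos.length : Int)
    · rw [if_pos h2]
      have hdrop : blocos.drop (i + offset).toNat = [] := List.drop_eq_nil_of_le (by omega)
      simp [hdrop]
    · rw [if_neg h2]
      have hlt : (i + offset).toNat < blocos.length := by omega
      have hget : PySem.List.pyGet? blocos (i + offset) = some blocos[(i + offset).toNat] :=
        PySem.List.pyGet?_eq_some_getElem blocos (by omega) (by omega)
      simp only [hget]
      have hdrop : blocos.drop (i + offset).toNat =
          blocos[(i + offset).toNat] :: blocos.drop ((i + offset).toNat + 1) :=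
        List.drop_eq_getElem_cons hlt
      rw [hdrop]
      by_cases hk : pvFid blocos[(i + offset).toNat] = cur
      · rw [if_neg (by simpa using hk)]
        have htw : pvKeyEq cur blocos[(i + offset).toNat] = true := by
          simp [pvKeyEq, hk]
        rw [List.takeWhile_cons_of_pos htw]
        have hnat : (janela - offset).toNat = (janela - (offset + 1)).toNat + 1 := by omega
        rw [hnat, List.take_succ_cons]
        rw [innerA_eq blocos janela cur i (offset + 1) (group ++ [blocos[(i + offset).toNat]]) hi (by omega)]
        have hsh : (i + (offset + 1)).toNat = (i + offset).toNat + 1 := by omega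
        rw [hsh, List.append_assoc]
        rfl
      · rw [if_pos hk]
        have htw : pvKeyEq cur blocos[(i + offset).toNat] = false := by
          simp [pvKeyEq, hk]
        rw [List.takeWhile_cons_of_neg (by simp [htw])]
        simp
  · rw [if_neg h1]
    have h0 : (janela - offset).toNat = 0 := by omega
    simp [h0]
termination_by (janela - offset).toNat
decreasing_by omega

-- A's per-index emission, as a function of the index over the whole list
def pvElem (janela : Int) (blocos : List (List (String × String))) (k : Nat) : List (List (String × String)) :=
  match blocos[k]? with
  | none => []
  | some base =>
    [pvMkOutA (base :: ((blocos.drop (k + 1)).takeWhile (pvKeyEq (pvFid base))).take (janela - 1).toNat) (pvFid base)]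

theorem elem_eq (janela : Int) (blocos : List (List (String × String))) (k : Nat) :
    (match PySem.List.pyGet? blocos (k : Int) with
     | none => []
     | some base =>
       [pvMkOutA (pvInnerA blocos (blocos.length : Int) (k : Int) janela (pvFid base) 1 [base]) (pvFid base)]) =
    pvElem janela blocos k := by
  rw [PySem.List.pyGet?_natCast]
  unfold pvElem
  cases h : blocos[k]? with
  | none => rfl
  | some base =>
    dsimp only
    have hk : k < blocos.length := by
      by_contra hge
      have hnone : blocos[k]? = none := List.getElem?_eq_none (by omega)
      rw [hnone] at h; simp at h
    rw [innerA_eq blocos janela (pvFid base) (k : Int) 1 [base] (by omega) (by omega)]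
    have hsh : ((k : Int) + 1).toNat = k + 1 := by omega
    rw [hsh]
    rfl

theorem pvElem_zero (janela : Int) (b : List (String × String)) (rest : List (List (String × String))) :
    pvElem janela (b :: rest) 0 =
      [pvMkOutA (b :: (rest.takeWhile (pvKeyEq (pvFid b))).take (janela - 1).toNat) (pvFid b)] := by
  simp [pvElem]

theorem pvElem_succ (janela : Int) (b : List (String × String)) (rest : List (List (String × String))) (k : Nat) :
    pvElem janela (b :: rest) (k + 1) = pvElem janela rest k := by
  unfold pvElem
  cases hh : rest[k]? with
  | none => simp [hh]
  | some base => simp [hh]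

theorem flatMap_range_eq_suf (janela : Int) (blocos : List (List (String × String))) :
    (List.range blocos.length).flatMap (pvElem janela blocos) = pvSufA janela blocos := by
  induction blocos with
  | nil => simp [pvSufA]
  | cons b rest ih =>
    rw [List.length_cons, List.range_succ_eq_map, List.flatMap_cons, List.flatMap_map, pvElem_zero]
    have hshift : (List.range rest.length).flatMap (fun a => pvElem janela (b :: rest) (a + 1)) =
        (List.range rest.length).flatMap (pvElem janela rest) :=
      List.flatMap_congr (fun k _ => pvElem_succ janela b rest k)
    simp only [Nat.succ_eq_add_one]
    rw [hshift, ih, pvSufA]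
    rfl

theorem A_eq_suf (blocos : List (List (String × String))) (janela : Int) :
    agrupar_blocos blocos janela = pvSufA janela blocos := by
  by_cases h : blocos = []
  · subst h; simp [agrupar_blocos, pvSufA]
  · simp only [agrupar_blocos]
    rw [if_neg (by simpa using h)]
    rw [PySem.List.foldl_append_eq_flatMap, List.nil_append, PySem.List.pyRange_one,
      List.flatMap_map]
    refine Eq.trans (List.flatMap_congr (g := pvElem janela blocos) ?_) ?_
    · intro k _
      show (match PySem.List.pyGet? blocos (0 + (k : Int)) with
            | none => []
            | some base =>
              [pvMkOutA (pvInnerA blocos (blocos.length : Int) (0 + (k : Int)) janela (pvFid base) 1 [base]) (pvFid base)]) =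
          pvElem janela blocos k
      rw [Int.zero_add]
      exact elem_eq janela blocos k
    · have he : ((blocos.length : Int) - 0).toNat = blocos.length := by omega
      rw [he]
      exact flatMap_range_eq_suf janela blocos

theorem mkAB (x : List (String × String)) (w : List (List (String × String))) :
    pvMkOutA (x :: w) (pvFid x) = pvMkOutB x (x :: w) := rfl

theorem takeWhile_dropWhile_nil {α : Type} (p : α → Bool) (l : List α) :
    (l.dropWhile p).takeWhile p = [] := by
  induction l with
  | nil => rfl
  | cons x xs ih =>
    by_cases h : p x
    · rw [List.dropWhile_cons_of_pos h]; exact ih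
    · rw [List.dropWhile_cons_of_neg h, List.takeWhile_cons_of_neg h]

theorem suf_run (janela : Int) (k : Option String) :
    ∀ (u rest' : List (List (String × String))),
    (∀ x ∈ u, pvFid x = k) → (rest'.takeWhile (pvKeyEq k) = []) →
    pvSufA janela (u ++ rest') =
      pvRunOut (max (janela - 1) 0) u ++ pvSufA janela rest' := by
  intro u
  induction u with
  | nil => intro rest' _ _; simp [pvRunOut]
  | cons x u' ih =>
    intro rest' hu hr
    have hx : pvFid x = k := hu x (List.mem_cons_self ..)
    have hu' : ∀ y ∈ u', pvFid y = k := fun y hy => hu y (List.mem_cons_of_mem x hy)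
    have htw : (u' ++ rest').takeWhile (pvKeyEq k) = u' := by
      rw [List.takeWhile_append]
      have hall : u'.takeWhile (pvKeyEq k) = u' := by
        apply List.takeWhile_eq_self_iff.mpr
        intro y hy; simp [pvKeyEq, pvFid] at *; exact hu' y hy
      rw [hall]
      simp [hr]
    rw [List.cons_append, pvSufA, hx, htw]
    rw [pvRunOut]
    have hsl : PySem.List.slice u' (some 0) (some (max (janela - 1) 0)) =
        u'.take (janela - 1).toNat := by
      rw [PySem.List.slice_toNat u' (le_refl 0) (le_max_right _ _)]
      congr 1
      omega
    rw [hsl, ← hx, mkAB]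
    rw [ih rest' hu' hr]
    simp

theorem suf_eq_B (janela : Int) (blocos : List (List (String × String))) :
    pvSufA janela blocos = agrupar_blocos_alt blocos janela := by
  unfold agrupar_blocos_alt
  induction blocos using pvRuns.induct with
  | case1 => simp [pvSufA, pvRuns]
  | case2 b rest ih =>
    rw [pvRuns, List.flatMap_cons]
    have hdecomp : b :: rest =
        (b :: rest.takeWhile (pvKeyEq (pvFid b))) ++ rest.dropWhile (pvKeyEq (pvFid b)) := by
      simp [List.takeWhile_append_dropWhile]
    rw [hdecomp]
    rw [suf_run janela (pvFid b) (b :: rest.takeWhile (pvKeyEq (pvFid b)))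
        (rest.dropWhile (pvKeyEq (pvFid b)))
        (by
          intro x hx
          rcases List.mem_cons.mp hx with h | h
          · subst h; rfl
          · have := List.mem_takeWhile_imp h
            simp [pvKeyEq, pvFid] at this ⊢; exact this)
        (takeWhile_dropWhile_nil _ _)]
    rw [ih]

-- ===== VERDICT (by name: the statement is the Claim_ definition above) =====
theorem agrupar_blocos_spec : Claim_equal_agrupar_blocos := by
  intro blocos janela _ _
  unfold Spec_agrupar_blocos
  rw [A_eq_suf, suf_eq_B]
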